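-- pv_equiv track=rewrite | github.com/slimthierry/bloodtrace | backend/app/utils/blood_compatibility.py | get_compatible_donor_types
-- ===== SOURCE A (Python) =====
-- from typing import List, Tuple
--
-- RBC_COMPATIBILITY = {
--     "O-":  ["O-"],
--     "O+":  ["O-", "O+"],
--     "A-":  ["O-", "A-"],
--     "A+":  ["O-", "O+", "A-", "A+"],
--     "B-":  ["O-", "B-"],
--     "B+":  ["O-", "O+", "B-", "B+"],
--     "AB-": ["O-", "A-", "B-", "AB-"],
--     "AB+": ["O-", "O+", "A-", "A+", "B-", "B+", "AB-", "AB+"],  # Universal recipient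
-- }
--
-- PLASMA_COMPATIBILITY = {
--     "O-":  ["O-", "O+", "A-", "A+", "B-", "B+", "AB-", "AB+"],  # Universal recipient for plasma
--     "O+":  ["O+", "A+", "B+", "AB+"],
--     "A-":  ["A-", "A+", "AB-", "AB+"],
--     "A+":  ["A+", "AB+"],
--     "B-":  ["B-", "B+", "AB-", "AB+"],
--     "B+":  ["B+", "AB+"],
--     "AB-": ["AB-", "AB+"],
--     "AB+": ["AB+"],  # Universal donor for plasma
-- }
--
-- def _to_group(blood_type: str, rh_factor: str) -> str:
--     """Combine blood type and Rh factor into a blood group string."""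
--     return f"{blood_type}{rh_factor}"
--
-- def get_compatible_donor_types(
--     recipient_blood_type: str,
--     recipient_rh: str,
--     component: str = "packed_rbc",
-- ) -> List[Tuple[str, str]]:
--     """Get list of compatible donor blood types for a recipient.
--
--     Args:
--         recipient_blood_type: Recipient ABO type
--         recipient_rh: Recipient Rh factor
--         component: Blood component type
--
--     Returns:
--         List of (blood_type, rh_factor) tuples that are compatible.
--     """
--     recipient_group = _to_group(recipient_blood_type, recipient_rh)
--
--     if component in ("plasma", "cryoprecipitate"):
--         compatible_groups = PLASMA_COMPATIBILITY.get(recipient_group, [])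
--     else:
--         compatible_groups = RBC_COMPATIBILITY.get(recipient_group, [])
--
--     result = []
--     for group in compatible_groups:
--         if group.startswith("AB"):
--             result.append(("AB", group[2:]))
--         else:
--             result.append((group[0], group[1:]))
--
--     return result
-- ===== SOURCE B (Python) =====
-- from typing import List, Tuple
--
-- # All donor blood groups in canonical order (O before A before B before AB, '-' before '+').
-- DONOR_ORDER = [("O", "-"), ("O", "+"), ("A", "-"), ("A", "+"),
--                ("B", "-"), ("B", "+"), ("AB", "-"), ("AB", "+")]
--
--
-- def get_compatible_donor_types(
--     recipient_blood_type: str,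
--     recipient_rh: str,
--     component: str = "packed_rbc",
-- ) -> List[Tuple[str, str]]:
--     """Compute compatible donors from antigen-subset rules instead of lookup tables.
--
--     RBC: donor cells must carry no antigen (A, B, RhD) the recipient lacks.
--     Plasma: donor plasma must carry no antibody against the recipient, i.e. the
--     donor must have every antigen the recipient has. Both rules, filtered over
--     the canonical donor order, reproduce the standard compatibility tables.
--     """
--     group = recipient_blood_type + recipient_rh
--     if not group or group[-1] not in "+-":
--         return []
--     abo, rh = group[:-1], group[-1]
--     if abo not in ("O", "A", "B", "AB"):
--         return []
--     plasma = component in ("plasma", "cryoprecipitate")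
--     result = []
--     for dabo, drh in DONOR_ORDER:
--         if plasma:
--             ok = ("A" not in abo or "A" in dabo) and ("B" not in abo or "B" in dabo) \
--                  and (rh == "-" or drh == "+")
--         else:
--             ok = ("A" not in dabo or "A" in abo) and ("B" not in dabo or "B" in abo) \
--                  and (drh == "-" or rh == "+")
--         if ok:
--             result.append((dabo, drh))
--     return result
-- ===== Notes on version B (the rewrite author's own statement) =====
-- stated objective: alternative
-- what changed: B has no compatibility tables at all: it parses the recipient group, then filters the eight donor groups in canonical order by the immunological antigen-subset rule (RBC: donor antigens subset of recipient's; plasma: the reverse), which provably reproduces A's table rows.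
import Mathlib
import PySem

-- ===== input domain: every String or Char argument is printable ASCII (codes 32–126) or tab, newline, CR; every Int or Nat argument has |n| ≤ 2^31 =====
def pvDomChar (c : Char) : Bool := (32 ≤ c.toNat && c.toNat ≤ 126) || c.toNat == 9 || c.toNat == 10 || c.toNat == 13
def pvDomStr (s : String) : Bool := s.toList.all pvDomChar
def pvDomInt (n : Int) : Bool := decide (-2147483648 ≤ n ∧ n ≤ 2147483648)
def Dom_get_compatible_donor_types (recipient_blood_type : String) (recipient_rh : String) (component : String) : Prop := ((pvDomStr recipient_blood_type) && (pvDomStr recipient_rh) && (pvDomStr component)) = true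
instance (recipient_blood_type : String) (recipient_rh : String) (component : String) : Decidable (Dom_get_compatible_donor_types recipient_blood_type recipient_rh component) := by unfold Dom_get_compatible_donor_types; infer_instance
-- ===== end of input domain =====

-- B drops A's lookup tables entirely: it filters the eight donor groups by the
-- immunological antigen-subset rule (objective: alternative, rule-based instead of table-driven).

-- ===== PORT A =====
-- RBC_COMPATIBILITY (dict str -> list[str]; keys/values as List Char so the parsing loop is exact)
def pvRbcCompat : PySem.Dict (List Char) (List (List Char)) := PySem.Dict.ofList [
  ("O-".toList,  ["O-".toList]),
  ("O+".toList,  ["O-".toList, "O+".toList]),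
  ("A-".toList,  ["O-".toList, "A-".toList]),
  ("A+".toList,  ["O-".toList, "O+".toList, "A-".toList, "A+".toList]),
  ("B-".toList,  ["O-".toList, "B-".toList]),
  ("B+".toList,  ["O-".toList, "O+".toList, "B-".toList, "B+".toList]),
  ("AB-".toList, ["O-".toList, "A-".toList, "B-".toList, "AB-".toList]),
  ("AB+".toList, ["O-".toList, "O+".toList, "A-".toList, "A+".toList, "B-".toList, "B+".toList, "AB-".toList, "AB+".toList])]

-- PLASMA_COMPATIBILITY
def pvPlasmaCompat : PySem.Dict (List Char) (List (List Char)) := PySem.Dict.ofList [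
  ("O-".toList,  ["O-".toList, "O+".toList, "A-".toList, "A+".toList, "B-".toList, "B+".toList, "AB-".toList, "AB+".toList]),
  ("O+".toList,  ["O+".toList, "A+".toList, "B+".toList, "AB+".toList]),
  ("A-".toList,  ["A-".toList, "A+".toList, "AB-".toList, "AB+".toList]),
  ("A+".toList,  ["A+".toList, "AB+".toList]),
  ("B-".toList,  ["B-".toList, "B+".toList, "AB-".toList, "AB+".toList]),
  ("B+".toList,  ["B+".toList, "AB+".toList]),
  ("AB-".toList, ["AB-".toList, "AB+".toList]),
  ("AB+".toList, ["AB+".toList])]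

-- A's result loop: for group in compatible_groups: append ("AB", group[2:]) or (group[0], group[1:]).
-- group[0] is ported as `g.take 1` (exact here: every table entry is nonempty); g[1:], g[2:] via PySem.List.slice.
def pvParseGroups (groups : List (List Char)) : List (String × String) :=
  groups.foldl (fun acc g =>
    if PySem.Chars.startswith g "AB".toList then
      acc ++ [(("AB" : String), String.ofList (PySem.List.slice g (some 2) none))]
    else
      acc ++ [(String.ofList (g.take 1), String.ofList (PySem.List.slice g (some 1) none))]) []

def get_compatible_donor_types (recipient_blood_type : String) (recipient_rh : String) (component : String) : List (String × String) :=
  let recipient_group := recipient_blood_type.toList ++ recipient_rh.toList   -- _to_group: f"{bt}{rh}"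
  let compatible_groups :=
    if component == "plasma" || component == "cryoprecipitate" then
      pvPlasmaCompat.getD recipient_group []
    else
      pvRbcCompat.getD recipient_group []
  pvParseGroups compatible_groups

-- ===== PORT B =====
-- DONOR_ORDER: all donor blood groups in canonical order.
def pvDonorOrder : List (String × String) :=
  [("O", "-"), ("O", "+"), ("A", "-"), ("A", "+"), ("B", "-"), ("B", "+"), ("AB", "-"), ("AB", "+")]

-- The rule-based loop body over (abo, rh=c) of the recipient; "X" in s is 'X' ∈ s.toList (exact for 1-char needles).
def pvRuleLoop (abo : List Char) (c : Char) (plasma : Bool) : List (String × String) :=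
  pvDonorOrder.foldl (fun acc p =>
    let dabo := p.1.toList
    let drh := p.2.toList
    let ok :=
      if plasma then
        (!('A' ∈ abo) || ('A' ∈ dabo)) && (!('B' ∈ abo) || ('B' ∈ dabo)) && (c == '-' || drh == ['+'])
      else
        (!('A' ∈ dabo) || ('A' ∈ abo)) && (!('B' ∈ dabo) || ('B' ∈ abo)) && (drh == ['-'] || c == '+')
    if ok then acc ++ [p] else acc) []

def get_compatible_donor_types_alt (recipient_blood_type : String) (recipient_rh : String) (component : String) : List (String × String) :=
  let group := recipient_blood_type.toList ++ recipient_rh.toList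
  match group.getLast? with
  | none => []          -- "if not group: return []"
  | some c =>
    if c = '+' ∨ c = '-' then
      let abo := group.dropLast
      if abo = "O".toList ∨ abo = "A".toList ∨ abo = "B".toList ∨ abo = "AB".toList then
        pvRuleLoop abo c (component == "plasma" || component == "cryoprecipitate")
      else []
    else []

-- ===== PRECONDITION & SPEC =====
def Spec_get_compatible_donor_types (recipient_blood_type : String) (recipient_rh : String) (component : String) (out : List (String × String)) : Prop := out = get_compatible_donor_types_alt recipient_blood_type recipient_rh component
instance (recipient_blood_type : String) (recipient_rh : String) (component : String) (out : List (String × String)) : Decidable (Spec_get_compatible_donor_types recipient_blood_type recipient_rh component out) := by unfold Spec_get_compatible_donor_types; infer_instance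

-- ===== CLAIM (what is proved, stated in full; the proofs are below) =====
def Claim_equal_get_compatible_donor_types : Prop := ∀ (recipient_blood_type : String) (recipient_rh : String) (component : String), Dom_get_compatible_donor_types recipient_blood_type recipient_rh component → Spec_get_compatible_donor_types recipient_blood_type recipient_rh component (get_compatible_donor_types recipient_blood_type recipient_rh component)

-- ===== LEMMAS AND PROOFS =====
-- A's side on (the char list of) the group, with the plasma flag factored out.
def pvACore (g : List Char) (plasma : Bool) : List (String × String) :=
  pvParseGroups ((if plasma then pvPlasmaCompat else pvRbcCompat).getD g [])

-- B's side on the group.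
def pvBCore (g : List Char) (plasma : Bool) : List (String × String) :=
  match g.getLast? with
  | none => []
  | some c =>
    if c = '+' ∨ c = '-' then
      if g.dropLast = "O".toList ∨ g.dropLast = "A".toList ∨ g.dropLast = "B".toList ∨ g.dropLast = "AB".toList then
        pvRuleLoop g.dropLast c plasma
      else []
    else []

lemma pvCore_eq (g : List Char) (plasma : Bool) : pvACore g plasma = pvBCore g plasma := by
  by_cases h1 : g = "O-".toList;  · subst h1; cases plasma <;> decide
  by_cases h2 : g = "O+".toList;  · subst h2; cases plasma <;> decide
  by_cases h3 : g = "A-".toList;  · subst h3; cases plasma <;> decide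
  by_cases h4 : g = "A+".toList;  · subst h4; cases plasma <;> decide
  by_cases h5 : g = "B-".toList;  · subst h5; cases plasma <;> decide
  by_cases h6 : g = "B+".toList;  · subst h6; cases plasma <;> decide
  by_cases h7 : g = "AB-".toList; · subst h7; cases plasma <;> decide
  by_cases h8 : g = "AB+".toList; · subst h8; cases plasma <;> decide
  -- g is not one of the eight blood groups: both sides are [].
  have hA : pvACore g plasma = [] := by
    have e1 : ((['O','-'] : List Char) == g) = false := beq_eq_false_iff_ne.mpr (Ne.symm h1)
    have e2 : ((['O','+'] : List Char) == g) = false := beq_eq_false_iff_ne.mpr (Ne.symm h2)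
    have e3 : ((['A','-'] : List Char) == g) = false := beq_eq_false_iff_ne.mpr (Ne.symm h3)
    have e4 : ((['A','+'] : List Char) == g) = false := beq_eq_false_iff_ne.mpr (Ne.symm h4)
    have e5 : ((['B','-'] : List Char) == g) = false := beq_eq_false_iff_ne.mpr (Ne.symm h5)
    have e6 : ((['B','+'] : List Char) == g) = false := beq_eq_false_iff_ne.mpr (Ne.symm h6)
    have e7 : ((['A','B','-'] : List Char) == g) = false := beq_eq_false_iff_ne.mpr (Ne.symm h7)
    have e8 : ((['A','B','+'] : List Char) == g) = false := beq_eq_false_iff_ne.mpr (Ne.symm h8)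
    cases plasma <;>
      simp [pvACore, pvRbcCompat, pvPlasmaCompat, pvParseGroups, PySem.Dict.getD, PySem.Dict.get?,
            PySem.Dict.ofList, PySem.Dict.update, PySem.Dict.insert, PySem.Dict.empty,
            PySem.Dict.contains, e1, e2, e3, e4, e5, e6, e7, e8]
  have hB : pvBCore g plasma = [] := by
    unfold pvBCore
    cases hl : g.getLast? with
    | none => rfl
    | some c =>
      have hne : g ≠ [] := by intro h; subst h; simp at hl
      have hg : g.dropLast ++ [c] = g := by
        have := List.dropLast_concat_getLast hne
        rwa [List.getLast_eq_iff_getLast?_eq_some hne |>.mpr hl] at this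
      by_cases hc : c = '+' ∨ c = '-'
      · by_cases habo : g.dropLast = "O".toList ∨ g.dropLast = "A".toList ∨ g.dropLast = "B".toList ∨ g.dropLast = "AB".toList
        · exfalso
          rcases habo with h | h | h | h <;> rw [h] at hg <;> rcases hc with hc | hc <;>
            subst hc <;> simp_all
        · simp [hc]
          intro h
          exact absurd (by simpa using h) habo
      · simp [hc]
  rw [hA, hB]

-- ===== VERDICT (by name: the statement is the Claim_ definition above) =====
theorem get_compatible_donor_types_spec : Claim_equal_get_compatible_donor_types := by
  intro bt rh comp _
  unfold Spec_get_compatible_donor_types get_compatible_donor_types get_compatible_donor_types_alt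
  have h := pvCore_eq (bt.toList ++ rh.toList) (comp == "plasma" || comp == "cryoprecipitate")
  unfold pvACore pvBCore at h
  cases hp : (comp == "plasma" || comp == "cryoprecipitate") <;> simp [hp] at h ⊢ <;> exact h
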